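-- pv_equiv track=rewrite | github.com/tulioac/ExerciciosTST | unidade08/force_sort/p.py | force_sort
-- ===== SOURCE A (Python) =====
-- def force_sort(seq):
--     diferencas = []
--     if seq:
--         diferencas.append(0)
--
--         for i in range(len(seq)-1):
--             if seq[i] > seq[i+1]:
--                 diferencas.append(abs(seq[i]-seq[i+1]))
--                 seq[i+1] = seq[i]
--             else:
--                 diferencas.append(0)
--     return diferencas
-- ===== SOURCE B (Python) =====
-- def force_sort(seq):
--     # two-pass: build the running-maximum table first, then the differences;
--     # also replays A's in-place mutation (seq becomes its cumulative maxima)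
--     if not seq:
--         return []
--     cummax = []
--     m = seq[0]
--     for x in seq:
--         m = m if m > x else x
--         cummax.append(m)
--     diffs = [0] + [cummax[i] - seq[i + 1] if cummax[i] > seq[i + 1] else 0
--                    for i in range(len(seq) - 1)]
--     seq[:] = cummax
--     return diffs
-- ===== Notes on version B (the rewrite author's own statement) =====
-- stated objective: alternative
-- what changed: B replaces A's single fused loop (which mutates seq in place while appending differences) with two separate passes: first build the cumulative-maximum table, then derive the differences against the original sequence by a comprehension, finally writing the maxima back into seq to replay A's mutation.
import Mathlib
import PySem

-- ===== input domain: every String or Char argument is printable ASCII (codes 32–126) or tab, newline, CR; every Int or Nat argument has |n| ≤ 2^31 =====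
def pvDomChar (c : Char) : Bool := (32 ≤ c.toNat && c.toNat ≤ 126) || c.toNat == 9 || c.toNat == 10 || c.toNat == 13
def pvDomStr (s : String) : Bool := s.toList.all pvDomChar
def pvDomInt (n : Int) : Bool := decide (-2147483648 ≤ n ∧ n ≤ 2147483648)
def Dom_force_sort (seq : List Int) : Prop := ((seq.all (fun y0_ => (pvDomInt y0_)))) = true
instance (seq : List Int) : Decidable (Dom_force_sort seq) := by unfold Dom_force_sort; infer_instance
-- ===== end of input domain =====

-- B builds the cumulative-maximum table in one pass and derives the differences in a second
-- pass, instead of A's single fused loop that mutates seq in place; equivalence is about the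
-- RETURN value only (the Python B replays A's in-place mutation of seq; ports are pure).

-- ===== PORT A =====
-- fused loop: state is (diferencas, seq); seq[i+1] is overwritten when seq[i] > seq[i+1]
def force_sort (seq : List Int) : List Int :=
  if seq = [] then []
  else
    ((List.range (seq.length - 1)).foldl
      (fun (st : List Int × List Int) i =>
        let a := st.2.getD i 0
        let b := st.2.getD (i + 1) 0
        if a > b then (st.1 ++ [|a - b|], st.2.set (i + 1) a)
        else (st.1 ++ [(0 : Int)], st.2))
      ([(0 : Int)], seq)).1

-- ===== PORT B =====
-- pass 1: cumulative maxima; pass 2: differences against the original seq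
def force_sort_alt (seq : List Int) : List Int :=
  if seq = [] then []
  else
    let cummax := (seq.foldl
      (fun (st : List Int × Int) y =>
        let m := if st.2 > y then st.2 else y
        (st.1 ++ [m], m)) ([], seq.getD 0 0)).1
    0 :: (List.range (seq.length - 1)).map (fun i =>
      if cummax.getD i 0 > seq.getD (i + 1) 0
      then cummax.getD i 0 - seq.getD (i + 1) 0 else 0)

-- ===== PRECONDITION & SPEC =====
def Spec_force_sort (seq : List Int) (out : List Int) : Prop := out = force_sort_alt seq
instance (seq : List Int) (out : List Int) : Decidable (Spec_force_sort seq out) := by unfold Spec_force_sort; infer_instance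

-- ===== CLAIM (what is proved, stated in full; the proofs are below) =====
def Claim_equal_force_sort : Prop := ∀ (seq : List Int), Dom_force_sort seq → Spec_force_sort seq (force_sort seq)

-- ===== LEMMAS AND PROOFS =====

-- simple recursive characterisation of B's cummax fold
def cmx : Int → List Int → List Int
  | _, [] => []
  | m, y :: ys => (if m > y then m else y) :: cmx (if m > y then m else y) ys

theorem cmx_length (m : Int) (ys : List Int) : (cmx m ys).length = ys.length := by
  induction ys generalizing m with
  | nil => rfl
  | cons y ys ih => simp [cmx, ih]

theorem foldl_cmx (ys : List Int) (acc : List Int) (m : Int) :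
    (ys.foldl (fun (st : List Int × Int) y =>
        let m := if st.2 > y then st.2 else y
        (st.1 ++ [m], m)) (acc, m)).1
      = acc ++ cmx m ys := by
  induction ys generalizing acc m with
  | nil => simp [cmx]
  | cons y ys ih => simp [List.foldl, cmx, ih]

theorem getD_append_lt (l1 l2 : List Int) (i : ℕ) (h : i < l1.length) :
    (l1 ++ l2).getD i 0 = l1.getD i 0 := by
  simp [List.getD, List.getElem?_append_left h]

theorem getD_append_ge (l1 l2 : List Int) (i : ℕ) (h : l1.length ≤ i) :
    (l1 ++ l2).getD i 0 = l2.getD (i - l1.length) 0 := by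
  simp [List.getD, List.getElem?_append_right h]

theorem getD_take (l : List Int) (i k : ℕ) (h : i < k) :
    (l.take k).getD i 0 = l.getD i 0 := by
  simp [List.getD, h]

-- step relation of cmx entries
theorem cmx_getD_succ (ys : List Int) (m : Int) (i : ℕ) (h : i + 1 < ys.length) :
    (cmx m ys).getD (i + 1) 0
      = (if (cmx m ys).getD i 0 > ys.getD (i + 1) 0
         then (cmx m ys).getD i 0 else ys.getD (i + 1) 0) := by
  induction ys generalizing m i with
  | nil => simp at h
  | cons y ys ih =>
    cases i with
    | zero =>
      cases ys with
      | nil => simp at h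
      | cons z zs => simp [cmx]
    | succ j =>
      simp only [cmx, List.getD_cons_succ, List.length_cons] at *
      exact ih _ j (by omega)

-- the main loop invariant for A's fold, phrased against cummax = x :: cmx x xs
theorem loop_inv (x : Int) (xs : List Int) (k : ℕ) (hk : k ≤ xs.length) :
    ((List.range k).foldl
      (fun (st : List Int × List Int) i =>
        let a := st.2.getD i 0
        let b := st.2.getD (i + 1) 0
        if a > b then (st.1 ++ [|a - b|], st.2.set (i + 1) a)
        else (st.1 ++ [(0 : Int)], st.2))
      ([(0 : Int)], x :: xs))
    = (0 :: (List.range k).map (fun i =>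
        if (x :: cmx x xs).getD i 0 > (x :: xs).getD (i + 1) 0
        then (x :: cmx x xs).getD i 0 - (x :: xs).getD (i + 1) 0 else 0),
       ((x :: cmx x xs).take (k + 1)) ++ ((x :: xs).drop (k + 1))) := by
  induction k with
  | zero =>
    simp
  | succ k ih =>
    have hk' : k ≤ xs.length := Nat.le_of_succ_le hk
    have hlc : (cmx x xs).length = xs.length := cmx_length x xs
    rw [List.range_succ, List.foldl_append, ih hk']
    simp only [List.foldl_cons, List.foldl_nil]
    have hklt : k + 1 < (x :: xs).length := by simp; omega
    have hlentake : ((x :: cmx x xs).take (k + 1)).length = k + 1 := by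
      simp [List.length_take]; omega
    have hgetA : (((x :: cmx x xs).take (k + 1)) ++ ((x :: xs).drop (k + 1))).getD k 0
        = (x :: cmx x xs).getD k 0 := by
      rw [getD_append_lt _ _ _ (by omega)]
      exact getD_take _ _ _ (by omega)
    have hdrop : (x :: xs).drop (k + 1) = (x :: xs).getD (k + 1) 0 :: (x :: xs).drop (k + 2) := by
      rw [List.getD_eq_getElem _ _ hklt]
      rw [List.drop_eq_getElem_cons hklt]
    have hgetB : (((x :: cmx x xs).take (k + 1)) ++ ((x :: xs).drop (k + 1))).getD (k + 1) 0
        = (x :: xs).getD (k + 1) 0 := by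
      rw [getD_append_ge _ _ _ (by omega), hlentake, hdrop]
      simp
    have hrel : (x :: cmx x xs).getD (k + 1) 0
        = (if (x :: cmx x xs).getD k 0 > (x :: xs).getD (k + 1) 0
           then (x :: cmx x xs).getD k 0 else (x :: xs).getD (k + 1) 0) := by
      cases k with
      | zero =>
        cases xs with
        | nil => simp at hklt
        | cons y ys => simp [cmx]
      | succ j =>
        have := cmx_getD_succ xs x j (by simp at hklt; omega)
        simpa using this
    have htake : (x :: cmx x xs).take (k + 2)
        = (x :: cmx x xs).take (k + 1) ++ [(x :: cmx x xs).getD (k + 1) 0] := by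
      have hk1 : k + 1 < (x :: cmx x xs).length := by simp; omega
      rw [List.getD_eq_getElem _ _ hk1]
      rw [List.take_add_one, List.getElem?_eq_getElem hk1]
      simp
    set a := (x :: cmx x xs).getD k 0 with ha
    set b := (x :: xs).getD (k + 1) 0 with hb
    rw [hgetA, hgetB]
    by_cases hab : a > b
    · simp only [hab, if_true, List.map_append, List.map_cons, List.map_nil]
      refine Prod.ext ?_ ?_
      · rw [← ha, ← hb]; simp [hab, abs_of_pos (by omega : (0:Int) < a - b)]
      · rw [List.set_append]
        rw [if_neg (by omega)]
        rw [hlentake]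
        have h0 : k + 1 - (k + 1) = 0 := by omega
        rw [h0, hdrop, List.set_cons_zero]
        rw [htake, hrel, ← ha, ← hb, if_pos hab]
        simp
        omega
    · simp only [hab, if_false, List.map_append, List.map_cons, List.map_nil]
      refine Prod.ext ?_ ?_
      · rw [← ha, ← hb]; simp [hab]
      · rw [htake, hrel, ← ha, ← hb, if_neg hab, List.append_assoc]
        rw [hdrop]; simp
        omega

-- ===== VERDICT (by name: the statement is the Claim_ definition above) =====
theorem force_sort_spec : Claim_equal_force_sort := by
  intro seq _
  unfold Spec_force_sort force_sort force_sort_alt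
  cases seq with
  | nil => simp
  | cons x xs =>
    rw [if_neg (by simp), if_neg (by simp)]
    rw [foldl_cmx]
    have hx : cmx x (x :: xs) = x :: cmx x xs := by simp [cmx]
    have := loop_inv x xs ((x :: xs).length - 1) (by simp)
    rw [this]
    simp [hx]
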